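-- pv_equiv track=rewrite | github.com/guimmp92/python | prefix_set.py | solution
-- ===== SOURCE A (Python) =====
-- def solution(A):
--     """
--     >>> solution([2, 2, 1, 0, 1])
--     3
--     """
--     tracker = dict()
--     for elem in A:
--         tracker[elem] = 1
--
--     for i in range(len(A)):
--         if A[i] in tracker:
--             tracker.pop(A[i])
--         if not tracker:
--             return i
-- ===== SOURCE B (Python) =====
-- def solution(A):
--     first = {}
--     for i, x in enumerate(A):
--         if x not in first:
--             first[x] = i
--     return max(first.values())
-- ===== Notes on version B (the rewrite author's own statement) =====
-- stated objective: simpler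
-- what changed: Replaces A's two-phase scan (build a dict of all distinct values, then re-scan popping each position until the dict empties) by one enumerate pass that records each value's first-occurrence index and returns the maximum of those indices.
-- outside the precondition, e.g. on solution([]): A returns None, B raises ValueError
import Mathlib
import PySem

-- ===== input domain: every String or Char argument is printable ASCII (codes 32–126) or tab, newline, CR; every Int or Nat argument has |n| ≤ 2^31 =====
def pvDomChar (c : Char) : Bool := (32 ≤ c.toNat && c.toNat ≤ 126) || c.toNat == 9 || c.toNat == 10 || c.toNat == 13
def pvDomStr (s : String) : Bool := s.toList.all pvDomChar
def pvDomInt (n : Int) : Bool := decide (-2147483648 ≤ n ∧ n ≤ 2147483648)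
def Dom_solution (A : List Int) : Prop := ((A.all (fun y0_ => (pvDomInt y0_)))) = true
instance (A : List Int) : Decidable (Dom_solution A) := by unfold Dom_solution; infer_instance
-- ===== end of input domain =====

-- B replaces A's build-dict-then-pop two-phase scan by a single enumerate pass recording
-- first-occurrence indices and returning their maximum (objective: simpler).


-- ===== PORT A =====
-- second loop of A: runs over the indices range(len(A)); A[i] is always in range there,
-- so pyGetD (default never used) is exact
def solutionLoop (A : List Int) : List Int → PySem.Dict Int Int → Int
  | [], _ => 0      -- Python falls off the loop and returns None here; excluded by Pre_solution
  | i :: rest, d =>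
      let x := PySem.List.pyGetD A i 0
      let d' := if d.contains x then d.erase x else d
      if d'.items = [] then i else solutionLoop A rest d'

def solution (A : List Int) : Int :=
  let tracker := A.foldl (fun d e => d.insert e 1) (∅ : PySem.Dict Int Int)
  solutionLoop A (PySem.List.pyRange 0 (PySem.List.len A)) tracker

-- ===== PORT B =====
def solution_alt (A : List Int) : Int :=
  let first := (PySem.List.enumerate A).foldl
      (fun d p => if d.contains p.2 then d else d.insert p.2 p.1)
      (∅ : PySem.Dict Int Int)
  -- max(first.values()): raises ValueError only when A = [], which Pre_solution excludes
  (PySem.List.max? first.values (fun v => v)).getD 0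

-- ===== PRECONDITION & SPEC =====
-- Pre_ excludes only the empty list, on which Python A falls through both loops and
-- returns None, which is not an int.
def Pre_solution (A : List Int) : Prop := A ≠ []
instance (A : List Int) : Decidable (Pre_solution A) := by unfold Pre_solution; infer_instance
def pvWitness_solution : List Int := [2, 2, 1, 0, 1]

def Spec_solution (A : List Int) (out : Int) : Prop := out = solution_alt A
instance (A : List Int) (out : Int) : Decidable (Spec_solution A out) := by unfold Spec_solution; infer_instance

-- ===== CLAIM (what is proved, stated in full; the proofs are below) =====
def Claim_equal_solution : Prop := ∀ (A : List Int), Dom_solution A → Pre_solution A → Spec_solution A (solution A)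

-- ===== LEMMAS AND PROOFS =====

-- the PySem.Set (distinct values of A) still missing from the prefix A.take k
def remaining (A : List Int) (k : Nat) : List Int :=
  (PySem.Set.ofList A).filter (fun x => decide (x ∉ A.take k))

theorem remaining_zero (A : List Int) : remaining A 0 = PySem.Set.ofList A := by
  simp [remaining]

theorem remaining_succ (A : List Int) (k : Nat) (hk : k < A.length) :
    remaining A (k + 1) = (remaining A k).filter (fun y => !(y == A.getD k 0)) := by
  unfold remaining
  rw [List.filter_filter]
  apply List.filter_congr
  intro x _
  have ht : A.take (k + 1) = A.take k ++ [A.getD k 0] := by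
    rw [List.take_add_one]
    have : A[k]? = some (A.getD k 0) := by
      rw [List.getD_eq_getElem _ _ hk, List.getElem?_eq_getElem hk]
    rw [this]
    rfl
  rw [ht]
  cases hbe : (x == A.getD k 0) with
  | true =>
    have h2 : x = A.getD k 0 := beq_iff_eq.mp hbe
    simp [h2]
  | false =>
    have h2 : x ≠ A.getD k 0 := by simpa using hbe
    by_cases h1 : x ∈ A.take k
    · simp [h1]
    · simp [h1]
      exact h2

theorem remaining_empty_iff (A : List Int) (k : Nat) :
    remaining A k = [] ↔ ∀ x ∈ A, x ∈ A.take k := by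
  unfold remaining
  rw [List.filter_eq_nil_iff]
  constructor
  · intro h x hx
    have := h x ((PySem.Set.mem_ofList A x).mpr hx)
    simpa using this
  · intro h x hx
    have hx' := (PySem.Set.mem_ofList A x).mp hx
    simp [h x hx']

-- Dict facts specialised to dicts whose items are a key list mapped with a value function
theorem anyMap (T : List Int) (f : Int → Int) (x : Int) :
    ((T.map (fun y => (y, f y))).any (fun p => p.1 == x)) = decide (x ∈ T) := by
  induction T with
  | nil => simp
  | cons t T ih =>
    by_cases h : t = x
    · simp [h, ih]
    · simp [h, Ne.symm h, ih]

theorem containsMap (T : List Int) (f : Int → Int) (x : Int) :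
    (PySem.Dict.mk (T.map (fun y => (y, f y)))).contains x = decide (x ∈ T) := by
  simp only [PySem.Dict.contains]
  exact anyMap T f x

theorem mapRepl (S : List Int) (f : Int → Int) (e : Int) :
    (S.map (fun x => (x, f x))).map (fun p => if p.1 == e then (e, f e) else p)
      = S.map (fun x => (x, f x)) := by
  rw [List.map_map]
  apply List.map_congr_left
  intro x _
  by_cases h : x = e
  · subst h; simp
  · simp [h]

-- phase 1 of A: after inserting every element with value 1, the items are the distinct
-- values (in first-occurrence order), each paired with 1
theorem phase1 (L : List Int) : ∀ (S : List Int),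
    (L.foldl (fun d e => d.insert e 1) (PySem.Dict.mk (S.map (fun x => (x, (1 : Int)))))).items
      = (PySem.Set.update S L).map (fun x => (x, (1 : Int))) := by
  induction L with
  | nil => intro S; simp [PySem.Set.update_nil]
  | cons e L ih =>
    intro S
    rw [List.foldl_cons, PySem.Set.update_cons]
    have hc : (PySem.Dict.mk (S.map (fun x => (x, (1 : Int))))).contains e = decide (e ∈ S) :=
      containsMap S (fun _ => 1) e
    by_cases h : e ∈ S
    · have : (PySem.Dict.mk (S.map (fun x => (x, (1 : Int))))).insert e 1
          = PySem.Dict.mk (S.map (fun x => (x, (1 : Int)))) := by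
        rw [PySem.Dict.insert, hc]
        simp only [h, decide_true, if_true]
        rw [mapRepl S (fun _ => 1) e]
      rw [this, PySem.Set.add_of_mem h]
      exact ih S
    · have : (PySem.Dict.mk (S.map (fun x => (x, (1 : Int))))).insert e 1
          = PySem.Dict.mk ((S ++ [e]).map (fun x => (x, (1 : Int)))) := by
        simp [PySem.Dict.insert, hc, h]
      rw [this, PySem.Set.add_of_not_mem h]
      exact ih (S ++ [e])

theorem tracker_items (A : List Int) :
    (A.foldl (fun d e => d.insert e 1) (∅ : PySem.Dict Int Int)).items
      = (PySem.Set.ofList A).map (fun x => (x, (1 : Int))) := by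
  have h0 : (∅ : PySem.Dict Int Int)
      = PySem.Dict.mk (([] : List Int).map (fun x => (x, (1 : Int)))) := rfl
  rw [h0, phase1 A []]
  rw [PySem.Set.ofList_eq_foldl, PySem.Set.update_eq_foldl]

-- B's fold: the dict of first occurrences maps each distinct value x to idxOf x A
theorem bfold (A : List Int) : ∀ (s P : List Int), A = P ++ s →
    ((PySem.List.enumerate s (P.length : Int)).foldl
        (fun d p => if d.contains p.2 then d else d.insert p.2 p.1)
        (PySem.Dict.mk ((PySem.Set.ofList P).map (fun x => (x, (List.idxOf x A : Int)))))).items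
      = (PySem.Set.ofList A).map (fun x => (x, (List.idxOf x A : Int))) := by
  intro s
  induction s with
  | nil => intro P hP; simp [PySem.List.enumerate_nil, hP]
  | cons a s' ih =>
    intro P hP
    rw [PySem.List.enumerate_cons, List.foldl_cons]
    have hc : (PySem.Dict.mk ((PySem.Set.ofList P).map (fun x => (x, (List.idxOf x A : Int))))).contains a
        = decide (a ∈ PySem.Set.ofList P) := containsMap _ _ a
    have hlen : ((P ++ [a]).length : Int) = (P.length : Int) + 1 := by
      simp
    by_cases h : a ∈ P
    · have hmem : a ∈ PySem.Set.ofList P := (PySem.Set.mem_ofList P a).mpr h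
      have heq : PySem.Set.ofList (P ++ [a]) = PySem.Set.ofList P := by
        rw [PySem.Set.ofList_append_singleton, PySem.Set.add_of_mem hmem]
      have := ih (P ++ [a]) (by simpa using hP)
      rw [heq, hlen] at this
      simpa [hc, hmem] using this
    · have hmem : a ∉ PySem.Set.ofList P := fun hm => h ((PySem.Set.mem_ofList P a).mp hm)
      have hidx : List.idxOf a A = P.length := by
        rw [hP, List.idxOf_append_of_notMem h]
        simp [List.idxOf_cons_eq _ rfl]
      have hins : (PySem.Dict.mk ((PySem.Set.ofList P).map (fun x => (x, (List.idxOf x A : Int))))).insert a (P.length : Int)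
          = PySem.Dict.mk ((PySem.Set.ofList (P ++ [a])).map (fun x => (x, (List.idxOf x A : Int)))) := by
        rw [PySem.Set.ofList_append_singleton, PySem.Set.add_of_not_mem hmem]
        simp [PySem.Dict.insert, hc, hmem, hidx]
      have := ih (P ++ [a]) (by simpa using hP)
      rw [hlen] at this
      simpa [hc, hmem, hins] using this

theorem alt_values (A : List Int) :
    ((PySem.List.enumerate A).foldl
        (fun d p => if d.contains p.2 then d else d.insert p.2 p.1)
        (∅ : PySem.Dict Int Int)).values
      = (PySem.Set.ofList A).map (fun x => (List.idxOf x A : Int)) := by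
  have hb := bfold A A [] rfl
  simp only [List.length_nil, Nat.cast_zero] at hb
  have h0 : (∅ : PySem.Dict Int Int)
      = PySem.Dict.mk ((PySem.Set.ofList ([] : List Int)).map (fun x => (x, (List.idxOf x A : Int)))) := rfl
  rw [PySem.Dict.values, h0, hb, List.map_map]
  rfl

theorem solutionLoop_cons (A : List Int) (i : Int) (rest : List Int) (d : PySem.Dict Int Int) :
    solutionLoop A (i :: rest) d =
      (let x := PySem.List.pyGetD A i 0
       let d' := if d.contains x then d.erase x else d
       if d'.items = [] then i else solutionLoop A rest d') := rfl

-- one iteration of A's main loop updates the invariant: the dict always holds exactly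
-- the values still missing from A.take k, each paired with 1
theorem stepLem (A : List Int) (k : Nat) (d : PySem.Dict Int Int) (hk : k < A.length)
    (hd : d.items = (remaining A k).map (fun x => (x, (1 : Int)))) :
    (if d.contains (PySem.List.pyGetD A (k : Int) 0)
      then d.erase (PySem.List.pyGetD A (k : Int) 0) else d).items
      = (remaining A (k + 1)).map (fun x => (x, (1 : Int))) := by
  have hget : PySem.List.pyGetD A (k : Int) 0 = A.getD k 0 := PySem.List.pyGetD_natCast A k 0
  have hcc : d.contains (PySem.List.pyGetD A (k : Int) 0) = decide (A.getD k 0 ∈ remaining A k) := by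
    rw [hget, show d.contains (A.getD k 0) = (PySem.Dict.mk d.items).contains (A.getD k 0) from rfl,
      hd]
    exact containsMap _ _ _
  have hcomp : ((fun p : Int × Int => !(p.1 == A.getD k 0)) ∘ (fun x => (x, (1 : Int))))
      = (fun y => !(y == A.getD k 0)) := rfl
  by_cases hm : A.getD k 0 ∈ remaining A k
  · rw [if_pos (by rw [hcc]; simpa using hm)]
    rw [PySem.Dict.erase]
    simp only [hd, hget, List.filter_map, hcomp]
    rw [← remaining_succ A k hk]
  · rw [if_neg (by rw [hcc]; simpa using hm)]
    rw [hd, remaining_succ A k hk]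
    have hself : (remaining A k).filter (fun y => !(y == A.getD k 0)) = remaining A k := by
      apply List.filter_eq_self.mpr
      intro y hy
      have hne : y ≠ A.getD k 0 := fun he => hm (he ▸ hy)
      simpa using hne
    rw [hself]

-- the main loop of A, under the invariant, returns the largest first-occurrence index
theorem loopLem (A : List Int) (x₀ : Int) (hx₀ : x₀ ∈ A)
    (hmax : ∀ y ∈ A, List.idxOf y A ≤ List.idxOf x₀ A) :
    ∀ (j k : Nat) (d : PySem.Dict Int Int), j = List.idxOf x₀ A - k → k ≤ List.idxOf x₀ A →
      d.items = (remaining A k).map (fun x => (x, (1 : Int))) →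
      solutionLoop A (PySem.List.pyRange (k : Int) (PySem.List.len A)) d = (List.idxOf x₀ A : Int) := by
  have hNlen : List.idxOf x₀ A < A.length := List.idxOf_lt_length_of_mem hx₀
  intro j
  induction j with
  | zero =>
    intro k d hj hk hd
    have hkN : k = List.idxOf x₀ A := by omega
    have hklen : k < A.length := by omega
    rw [show PySem.List.len A = (A.length : Int) from rfl,
      PySem.List.pyRange_one_cons (by exact_mod_cast hklen)]
    simp only [solutionLoop_cons]
    rw [stepLem A k d hklen hd]
    have hrem : remaining A (k + 1) = [] := by
      rw [remaining_empty_iff]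
      intro x hx
      rw [List.mem_take_iff_idxOf_lt hx]
      have := hmax x hx
      omega
    rw [hrem]
    simp [hkN]
  | succ j ih =>
    intro k d hj hk hd
    have hkN : k < List.idxOf x₀ A := by omega
    have hklen : k < A.length := by omega
    rw [show PySem.List.len A = (A.length : Int) from rfl,
      PySem.List.pyRange_one_cons (by exact_mod_cast hklen)]
    simp only [solutionLoop_cons]
    rw [stepLem A k d hklen hd]
    have hne : remaining A (k + 1) ≠ [] := by
      intro hnil
      rw [remaining_empty_iff] at hnil
      have := (List.mem_take_iff_idxOf_lt hx₀).mp (hnil x₀ hx₀)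
      omega
    rw [if_neg (by simpa using hne)]
    have hcast : ((k : Int) + 1) = ((k + 1 : Nat) : Int) := by push_cast; ring
    rw [hcast]
    exact ih (k + 1) _ (by omega) (by omega) (stepLem A k d hklen hd)

-- ===== VERDICT (by name: the statement is the Claim_ definition above) =====
theorem solution_spec : Claim_equal_solution := by
  unfold Claim_equal_solution
  intro A _ hpre
  unfold Pre_solution at hpre
  unfold Spec_solution
  -- the list of first-occurrence indices B takes the max of
  set vs := (PySem.Set.ofList A).map (fun x => (List.idxOf x A : Int)) with hvs
  have hAne : ∃ a, a ∈ A := List.exists_mem_of_ne_nil A hpre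
  obtain ⟨a, ha⟩ := hAne
  have hvsne : vs ≠ [] := by
    have : a ∈ PySem.Set.ofList A := (PySem.Set.mem_ofList A a).mpr ha
    simp only [hvs, ne_eq, List.map_eq_nil_iff]
    exact List.ne_nil_of_mem this
  obtain ⟨m, hm⟩ : ∃ m, PySem.List.max? vs (fun v => v) = some m := by
    cases h : PySem.List.max? vs (fun v => v) with
    | none => exact absurd ((PySem.List.max?_eq_none_iff vs _).mp h) hvsne
    | some m => exact ⟨m, rfl⟩
  obtain ⟨x₀, hx₀s, hx₀m⟩ : ∃ x₀ ∈ PySem.Set.ofList A, (List.idxOf x₀ A : Int) = m := by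
    have := PySem.List.max?_mem hm
    rw [hvs] at this
    exact List.mem_map.mp this
  have hx₀A : x₀ ∈ A := (PySem.Set.mem_ofList A x₀).mp hx₀s
  have hmax : ∀ y ∈ A, List.idxOf y A ≤ List.idxOf x₀ A := by
    intro y hy
    have hymem : (List.idxOf y A : Int) ∈ vs :=
      List.mem_map.mpr ⟨y, (PySem.Set.mem_ofList A y).mpr hy, rfl⟩
    have := PySem.List.max?_isMax hm _ hymem
    rw [← hx₀m] at this
    exact_mod_cast this
  -- A's side
  have hA : solution A = (List.idxOf x₀ A : Int) := by
    unfold solution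
    have htr : (A.foldl (fun d e => d.insert e 1) (∅ : PySem.Dict Int Int)).items
        = (remaining A 0).map (fun x => (x, (1 : Int))) := by
      rw [tracker_items, remaining_zero]
    have := loopLem A x₀ hx₀A hmax (List.idxOf x₀ A) 0 _ (by omega) (by omega) htr
    simpa using this
  -- B's side
  have hB : solution_alt A = m := by
    show (PySem.List.max? ((PySem.List.enumerate A).foldl
        (fun d p => if d.contains p.2 then d else d.insert p.2 p.1)
        (∅ : PySem.Dict Int Int)).values (fun v => v)).getD 0 = m
    rw [alt_values, ← hvs, hm]
    rfl
  rw [hA, hB, hx₀m]
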